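-- pv_equiv track=rewrite | github.com/SujeethJinesh/TerseTalk | benchmarks/streaming_boundaries.py | count_jsonl_boundaries
-- ===== SOURCE A (Python) =====
-- def count_jsonl_boundaries(stream: str) -> int:
--   if not stream:
--     return 0
--   cnt = 0
--   pos = 0
--   while True:
--     i = stream.find("\n", pos)
--     if i == -1:
--       break
--     cnt += 1
--     pos = i + 1
--   # last line (if not ending with newline)
--   if stream[-1] != "\n":
--     cnt += 1
--   return cnt
-- ===== SOURCE B (Python) =====
-- def count_jsonl_boundaries(stream: str) -> int:
--     parts = stream.split("\n")
--     return len(parts) - 1 if parts[-1] == "" else len(parts)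
-- ===== Notes on version B (the rewrite author's own statement) =====
-- stated objective: simpler
-- what changed: Replaces the manual find-next-newline loop plus empty-string guard and last-character check with a single split on the newline separator followed by length arithmetic on the parts list (dropping the trailing empty segment).
import Mathlib
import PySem

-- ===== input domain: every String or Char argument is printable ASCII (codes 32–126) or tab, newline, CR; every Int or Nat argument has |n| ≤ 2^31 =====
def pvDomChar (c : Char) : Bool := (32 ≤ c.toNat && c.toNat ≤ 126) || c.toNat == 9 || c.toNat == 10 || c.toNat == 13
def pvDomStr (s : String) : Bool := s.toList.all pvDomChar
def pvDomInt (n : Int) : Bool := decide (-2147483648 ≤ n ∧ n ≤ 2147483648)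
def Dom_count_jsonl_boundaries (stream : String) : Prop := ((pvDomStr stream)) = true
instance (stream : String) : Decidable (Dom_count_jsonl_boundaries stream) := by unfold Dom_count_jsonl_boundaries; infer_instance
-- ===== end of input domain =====

-- B replaces A's manual find-next-newline loop and last-character check by one split("\n")
-- plus length arithmetic (objective: simpler).

-- ===== PORT A =====
-- A's 'while True: i = stream.find("\n", pos); …' loop; the running position 'pos' is
-- carried as the remaining suffix stream.drop pos, so stream.find("\n", pos) is
-- PySem.Chars.find on that suffix (exact by PySem.Chars.findFrom_natCast).
def findLoopA (rest : List Char) (cnt : Int) : Int :=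
  if h : PySem.Chars.find rest ['\n'] = -1 then cnt
  else findLoopA (rest.drop ((PySem.Chars.find rest ['\n']).toNat + 1)) (cnt + 1)
termination_by rest.length
decreasing_by
  have hng := PySem.Chars.neg_one_le_find rest ['\n']
  have h0 : 0 ≤ PySem.Chars.find rest ['\n'] := by omega
  have hpre := (PySem.Chars.find_spec h0).1
  have hlt : (PySem.Chars.find rest ['\n']).toNat < rest.length := by
    by_contra hge
    rw [List.drop_eq_nil_of_le (by omega)] at hpre
    simp at hpre
  simp only [List.length_drop]
  omega

def count_jsonl_boundaries (stream : String) : Int :=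
  if stream = "" then 0
  else
    let cnt := findLoopA stream.toList 0
    if PySem.Str.pyGet? stream (-1) ≠ some '\n' then cnt + 1 else cnt

-- ===== PORT B =====
-- Source B: parts = stream.split("\n"); len(parts) - 1 if parts[-1] == "" else len(parts)
-- (split? is total for the non-empty separator "\n"; the none branch is unreachable).
def count_jsonl_boundaries_alt (stream : String) : Int :=
  let parts := (PySem.Str.split? stream "\n").getD []
  if PySem.List.pyGet? parts (-1) = some "" then (parts.length : Int) - 1
  else (parts.length : Int)

-- ===== PRECONDITION & SPEC =====
def Spec_count_jsonl_boundaries (stream : String) (out : Int) : Prop := out = count_jsonl_boundaries_alt stream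
instance (stream : String) (out : Int) : Decidable (Spec_count_jsonl_boundaries stream out) := by unfold Spec_count_jsonl_boundaries; infer_instance

-- ===== CLAIM (what is proved, stated in full; the proofs are below) =====
def Claim_equal_count_jsonl_boundaries : Prop := ∀ (stream : String), Dom_count_jsonl_boundaries stream → Spec_count_jsonl_boundaries stream (count_jsonl_boundaries stream)

-- ===== LEMMAS AND PROOFS =====

-- [a] is a prefix iff it is the head
theorem singleton_prefix_iff {a : Char} {l : List Char} : [a] <+: l ↔ l.head? = some a := by
  cases l with
  | nil => simp
  | cons b t => simp [List.cons_prefix_cons, eq_comm]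

-- [a] is an infix iff a is a member
theorem singleton_infix_iff {a : Char} {l : List Char} : [a] <:+: l ↔ a ∈ l := by
  constructor
  · rintro ⟨s, t, rfl⟩; simp
  · intro hm
    rcases List.mem_iff_append.mp hm with ⟨s, t, rfl⟩
    exact ⟨s, t, by simp⟩

theorem findLoopA_eq (rest : List Char) (cnt : Int) :
    findLoopA rest cnt = cnt + rest.count '\n' := by
  induction hn : rest.length using Nat.strong_induction_on generalizing rest cnt with
  | _ n ih =>
  subst hn
  rw [findLoopA]
  split_ifs with h
  · have hni : ¬ ['\n'] <:+: rest := (PySem.Chars.find_eq_neg_one_iff rest ['\n']).mp h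
    have hnm : '\n' ∉ rest := fun hm => hni (singleton_infix_iff.mpr hm)
    simp [List.count_eq_zero.mpr hnm]
  · have h0 : 0 ≤ PySem.Chars.find rest ['\n'] := by
      have := PySem.Chars.neg_one_le_find rest ['\n']
      omega
    set k := (PySem.Chars.find rest ['\n']).toNat with hk
    obtain ⟨hpre, hmin⟩ := PySem.Chars.find_spec h0
    have hhead : rest[k]? = some '\n' := by
      have := singleton_prefix_iff.mp hpre
      simpa [List.head?_drop] using this
    have hklt : k < rest.length := by
      by_contra hge
      rw [List.getElem?_eq_none (by omega)] at hhead
      simp at hhead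
    have hlen : (rest.drop (k + 1)).length < rest.length := by
      simp [List.length_drop]; omega
    rw [ih _ hlen _ _ rfl]
    -- count: rest = take k ++ '\n' :: drop (k+1), take k has no '\n'
    have hsplit : rest = rest.take k ++ '\n' :: rest.drop (k + 1) := by
      conv_lhs => rw [← List.take_append_drop (k + 1) rest]
      rw [List.take_add_one, hhead]
      simp
    have hnone : '\n' ∉ rest.take k := by
      intro hm
      rcases List.mem_iff_getElem?.mp hm with ⟨j, hj⟩
      have hjk : j < k := by
        by_contra hge
        rw [List.getElem?_take_eq_none (by omega)] at hj
        simp at hj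
      have : ['\n'] <+: rest.drop j := by
        rw [singleton_prefix_iff, List.head?_drop]
        rw [List.getElem?_take_of_lt hjk] at hj
        exact hj
      exact hmin j hjk this
    have hcnt : rest.count '\n' = (rest.drop (k + 1)).count '\n' + 1 := by
      conv_lhs => rw [hsplit]
      simp [List.count_append, List.count_eq_zero.mpr hnone]
    rw [hcnt]
    push_cast
    ring

-- reference splitter: stream.split("\n") on char lists, with the reversed current chunk
def splitNL : List Char → List Char → List (List Char)
  | [], cur => [cur.reverse]
  | c :: rest, cur =>
    if c = '\n' then cur.reverse :: splitNL rest [] else splitNL rest (c :: cur)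

theorem splitNL_ne_nil (l cur : List Char) : splitNL l cur ≠ [] := by
  induction l generalizing cur with
  | nil => simp [splitNL]
  | cons c rest ih =>
    by_cases h : c = '\n' <;> simp [splitNL, h, ih]

theorem length_splitNL (l cur : List Char) :
    (splitNL l cur).length = l.count '\n' + 1 := by
  induction l generalizing cur with
  | nil => simp [splitNL]
  | cons c rest ih =>
    by_cases h : c = '\n' <;> simp [splitNL, h, ih]

theorem getLast?_splitNL (l cur : List Char) :
    (splitNL l cur).getLast? = some [] ↔ ((l = [] ∧ cur = []) ∨ l.getLast? = some '\n') := by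
  induction l generalizing cur with
  | nil => simp [splitNL]
  | cons c rest ih =>
    by_cases h : c = '\n'
    · subst h
      rw [show splitNL ('\n' :: rest) cur = cur.reverse :: splitNL rest [] from by
        simp [splitNL]]
      obtain ⟨x, xs, he⟩ := List.exists_cons_of_ne_nil (splitNL_ne_nil rest [])
      rw [he, List.getLast?_cons_cons, ← he, ih]
      cases rest with
      | nil => simp
      | cons d t => simp [List.getLast?_cons_cons]
    · simp only [splitNL, if_neg h]
      rw [ih]
      cases rest with
      | nil => simp [h]
      | cons d t => simp [List.getLast?_cons_cons]

theorem go_eq_splitNL (fuel : Nat) (l cur : List Char) (acc : List (List Char))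
    (hf : l.length ≤ fuel) :
    PySem.Chars.splitOn.go ['\n'] fuel l cur acc = acc.reverse ++ splitNL l cur := by
  induction fuel generalizing l cur acc with
  | zero =>
    have : l = [] := List.length_eq_zero_iff.mp (by omega)
    subst this
    simp [PySem.Chars.splitOn.go, splitNL]
  | succ fuel ih =>
    cases l with
    | nil => simp [PySem.Chars.splitOn.go, splitNL]
    | cons c rest =>
      by_cases h : c = '\n'
      · subst h
        rw [PySem.Chars.splitOn.go]
        simp only [List.isPrefixOf, beq_self_eq_true, Bool.true_and, if_pos]
        rw [show List.drop (['\n'] : List Char).length ('\n' :: rest) = rest by simp]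
        rw [ih rest [] _ (by simp only [List.length_cons] at hf; omega)]
        simp [splitNL]
      · rw [PySem.Chars.splitOn.go]
        rw [show List.isPrefixOf ['\n'] (c :: rest) = false by
          simp [List.isPrefixOf, Ne.symm h]]
        simp only [Bool.false_eq_true, if_false]
        rw [ih _ _ _ (by simp only [List.length_cons] at hf; omega)]
        simp [splitNL, h]

theorem splitOn_eq_splitNL (l : List Char) :
    PySem.Chars.splitOn l ['\n'] = splitNL l [] := by
  rw [PySem.Chars.splitOn, go_eq_splitNL _ _ _ _ (by omega)]
  simp

theorem pyGet_neg_one {α : Type} (l : List α) (h : l ≠ []) :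
    PySem.List.pyGet? l (-1) = l.getLast? := by
  have hl : 0 < l.length := List.length_pos_of_ne_nil h
  simp only [PySem.List.pyGet?, PySem.List.pyIdx?]
  rw [if_neg (by omega), if_pos (by omega)]
  simp [List.getLast?_eq_getElem?]

theorem closedA (stream : String) :
    count_jsonl_boundaries stream =
      if stream.toList = [] then 0
      else (stream.toList.count '\n' : Int) +
        (if stream.toList.getLast? = some '\n' then 0 else 1) := by
  unfold count_jsonl_boundaries
  by_cases he : stream = ""
  · subst he; simp
  · have hne : stream.toList ≠ [] := by
      intro hh
      exact he (by rw [← String.ofList_toList (s := stream), hh])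
    rw [if_neg he, if_neg hne]
    have hget : PySem.List.pyGet? stream.toList (-1) = stream.toList.getLast? :=
      pyGet_neg_one _ hne
    rw [findLoopA_eq]
    by_cases hl : stream.toList.getLast? = some '\n'
    · simp [hget, hl]
    · simp [hget, hl]

theorem closedB (stream : String) :
    count_jsonl_boundaries_alt stream =
      if stream.toList = [] then 0
      else (stream.toList.count '\n' : Int) +
        (if stream.toList.getLast? = some '\n' then 0 else 1) := by
  unfold count_jsonl_boundaries_alt
  have hsplit : PySem.Str.split? stream "\n"
      = some ((splitNL stream.toList []).map String.ofList) := by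
    simp [PySem.Str.split?, PySem.Chars.split?, splitOn_eq_splitNL]
  rw [hsplit]
  simp only [Option.getD_some]
  have hnn : (splitNL stream.toList []).map String.ofList ≠ [] := by
    simp [splitNL_ne_nil]
  rw [pyGet_neg_one _ hnn, List.getLast?_map]
  have hlen : ((splitNL stream.toList []).map String.ofList).length
      = stream.toList.count '\n' + 1 := by
    simp [length_splitNL]
  by_cases hc : (splitNL stream.toList []).getLast? = some []
  · have : ((splitNL stream.toList []).getLast?).map String.ofList = some "" := by
      rw [hc]; rfl
    rw [if_pos this, hlen]
    rcases (getLast?_splitNL _ _).mp hc with ⟨h1, _⟩ | h2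
    · simp [h1]
    · have hne : stream.toList ≠ [] := by
        intro hh; rw [hh] at h2; simp at h2
      rw [if_neg hne, if_pos h2]
      omega
  · have hmap : ((splitNL stream.toList []).getLast?).map String.ofList ≠ some "" := by
      intro hh
      obtain ⟨x, hx, hx2⟩ : ∃ x, (splitNL stream.toList []).getLast? = some x ∧
          String.ofList x = "" := by
        cases hgl : (splitNL stream.toList []).getLast? with
        | none => rw [hgl] at hh; simp at hh
        | some x => rw [hgl] at hh; exact ⟨x, rfl, by simpa using hh⟩
      have hx0 : x = [] := by
        have := congrArg String.toList hx2
        simpa using this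
      exact hc (hx0 ▸ hx)
    rw [if_neg hmap, hlen]
    have hlast : ¬ ((stream.toList = [] ∧ ([] : List Char) = []) ∨ stream.toList.getLast? = some '\n') :=
      fun hh => hc ((getLast?_splitNL _ _).mpr hh)
    push Not at hlast
    obtain ⟨h1, h2⟩ := hlast
    have hne : stream.toList ≠ [] := fun hh => (h1 hh) rfl
    rw [if_neg hne, if_neg h2]
    omega

-- ===== VERDICT (by name: the statement is the Claim_ definition above) =====
theorem count_jsonl_boundaries_spec : Claim_equal_count_jsonl_boundaries := by
  intro stream _
  unfold Spec_count_jsonl_boundaries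
  rw [closedA, closedB]
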